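-- pv_equiv track=rewrite | github.com/retkiewi/quadrangularMeshGrammar | visualization.py | relabel_labels_with_duplicated_pos
-- ===== SOURCE A (Python) =====
-- def relabel_labels_with_duplicated_pos(labels, positions):
--     labels2 = labels.copy()
--     pos_label_dict = {}
--     for id, pos in positions.items():
--         if pos in pos_label_dict:
--             pos_label_dict[pos] += labels2[id]
--         else:
--             pos_label_dict[pos] = labels2[id]
--
--     for id, pos in positions.items():
--         labels2[id] = pos_label_dict[pos]
--
--     return labels2
-- ===== SOURCE B (Python) =====
-- def relabel_labels_with_duplicated_pos(labels, positions):
--     labels2 = labels.copy()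
--     # group the ids by position, in positions.items() order
--     groups = {}
--     for id, pos in positions.items():
--         groups.setdefault(pos, []).append(id)
--     # one merged label per group, assigned to every id of the group
--     for ids in groups.values():
--         merged = ""
--         for id in ids:
--             merged += labels[id]
--         for id in ids:
--             labels2[id] = merged
--     return labels2
-- ===== Notes on version B (the rewrite author's own statement) =====
-- stated objective: alternative
-- what changed: B builds a position->ids group index in one pass and assigns one merged label per group, instead of A's two element-wise passes that grow per-position strings and then re-read the dict per id.
import Mathlib
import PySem

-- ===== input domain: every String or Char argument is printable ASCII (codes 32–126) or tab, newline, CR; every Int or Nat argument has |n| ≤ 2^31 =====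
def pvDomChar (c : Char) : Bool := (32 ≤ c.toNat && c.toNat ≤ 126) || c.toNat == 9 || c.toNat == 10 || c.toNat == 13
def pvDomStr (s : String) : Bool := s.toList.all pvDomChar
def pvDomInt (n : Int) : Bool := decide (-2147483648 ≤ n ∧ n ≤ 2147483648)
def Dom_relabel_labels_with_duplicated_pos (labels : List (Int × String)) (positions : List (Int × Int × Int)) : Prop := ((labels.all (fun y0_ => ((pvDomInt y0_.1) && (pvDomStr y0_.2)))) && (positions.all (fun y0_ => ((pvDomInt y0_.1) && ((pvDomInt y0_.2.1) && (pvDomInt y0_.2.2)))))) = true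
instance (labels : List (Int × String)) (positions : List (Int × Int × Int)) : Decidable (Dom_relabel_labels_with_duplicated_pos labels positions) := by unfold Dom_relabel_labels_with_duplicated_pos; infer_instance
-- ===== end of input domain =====

-- B replaces A's two element-wise passes (concatenate per position, then re-read per id) by a
-- group-by-position index followed by one merged assignment per group (objective: alternative).

-- ===== PORT A =====
-- dict arguments/results are PySem.Dict; 'labels2[id]' (KeyError when id is missing) is getD "",
-- total exactly on Pre_ (every position id is a labels key); 'pos_label_dict[pos]' in the second
-- pass can never raise (every pos was inserted in the first pass).
def relabel_labels_with_duplicated_pos (labels : List (Int × String)) (positions : List (Int × Int × Int)) : List (Int × String) :=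
  let labels2 := PySem.Dict.ofList labels
  let poss := PySem.Dict.ofList positions
  let pld := poss.items.foldl
    (fun d p =>
      if d.contains p.2 then d.insert p.2 (d.getD p.2 "" ++ labels2.getD p.1 "")
      else d.insert p.2 (labels2.getD p.1 ""))
    PySem.Dict.empty
  let labels3 := poss.items.foldl (fun l2 p => l2.insert p.1 (pld.getD p.2 "")) labels2
  labels3.items

-- ===== PORT B =====
-- 'groups.setdefault(pos, []).append(id)' is exactly Dict.modify pos [] (· ++ [id]);
-- 'merged += labels[id]' reads the untouched original dict (labels2 = labels.copy()).
def relabel_labels_with_duplicated_pos_alt (labels : List (Int × String)) (positions : List (Int × Int × Int)) : List (Int × String) :=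
  let labels2 := PySem.Dict.ofList labels
  let poss := PySem.Dict.ofList positions
  let groups := poss.items.foldl (fun g p => g.modify p.2 [] (fun t => t ++ [p.1])) PySem.Dict.empty
  let out := groups.items.foldl
    (fun l2 g =>
      let merged := g.2.foldl (fun acc id => acc ++ labels2.getD id "") ""
      g.2.foldl (fun l2' id => l2'.insert id merged) l2)
    labels2
  out.items

-- ===== PRECONDITION & SPEC =====
-- Pre_ excludes exactly the inputs where Python A raises KeyError: a position id absent from labels.
def Pre_relabel_labels_with_duplicated_pos (labels : List (Int × String)) (positions : List (Int × Int × Int)) : Prop :=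
  ∀ p ∈ positions, ∃ q ∈ labels, q.1 = p.1
instance (labels : List (Int × String)) (positions : List (Int × Int × Int)) : Decidable (Pre_relabel_labels_with_duplicated_pos labels positions) := by unfold Pre_relabel_labels_with_duplicated_pos; infer_instance
def pvWitness_relabel_labels_with_duplicated_pos : (List (Int × String)) × (List (Int × Int × Int)) :=
  ([(1, "a"), (2, "b"), (3, "c")], [(1, (0, 0)), (3, (1, 1)), (2, (0, 0))])

def Spec_relabel_labels_with_duplicated_pos (labels : List (Int × String)) (positions : List (Int × Int × Int)) (out : List (Int × String)) : Prop := out = relabel_labels_with_duplicated_pos_alt labels positions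
instance (labels : List (Int × String)) (positions : List (Int × Int × Int)) (out : List (Int × String)) : Decidable (Spec_relabel_labels_with_duplicated_pos labels positions out) := by unfold Spec_relabel_labels_with_duplicated_pos; infer_instance

-- ===== CLAIM (what is proved, stated in full; the proofs are below) =====
def Claim_equal_relabel_labels_with_duplicated_pos : Prop := ∀ (labels : List (Int × String)) (positions : List (Int × Int × Int)), Dom_relabel_labels_with_duplicated_pos labels positions → Pre_relabel_labels_with_duplicated_pos labels positions → Spec_relabel_labels_with_duplicated_pos labels positions (relabel_labels_with_duplicated_pos labels positions)

-- ===== LEMMAS AND PROOFS =====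

-- the merged label of position q: A builds it value-by-value, B per group; both equal this fold
def pvCat (L : PySem.Dict Int String) (l : List (Int × Int × Int)) : String :=
  l.foldl (fun a p => a ++ L.getD p.1 "") ""

theorem pv_keys_ofList {κ ν : Type} [BEq κ] [LawfulBEq κ] (ps : List (κ × ν)) :
    (PySem.Dict.ofList ps).keys = PySem.Set.ofList (ps.map Prod.fst) := by
  show ((ps.foldl (fun d p => d.insert p.1 p.2) PySem.Dict.empty)).keys = _
  rw [PySem.Dict.keys_foldl_insert_key ps Prod.fst (fun _ p => p.2) PySem.Dict.empty,
    PySem.Dict.keys_empty, PySem.Set.update_nil_left]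

theorem pv_getD_foldl_insert_absent {κ ν : Type} [BEq κ] [LawfulBEq κ] [DecidableEq κ]
    (l : List (κ × ν)) (k : κ) (c : ν) (h : ∀ p ∈ l, p.1 ≠ k) :
    ∀ d : PySem.Dict κ ν, (l.foldl (fun d p => d.insert p.1 p.2) d).getD k c = d.getD k c := by
  induction l with
  | nil => intro d; rfl
  | cons p l ih =>
    intro d
    rw [List.foldl_cons, ih (fun p' hp' => h p' (List.mem_cons_of_mem _ hp')),
      PySem.Dict.getD_insert, if_neg (fun hk => h p (List.mem_cons_self) hk.symm)]

theorem pv_getD_foldl_insert_uniform {κ ν : Type} [BEq κ] [LawfulBEq κ] [DecidableEq κ]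
    (l : List (κ × ν)) (k : κ) (c w : ν)
    (hex : ∃ p ∈ l, p.1 = k) (hu : ∀ p ∈ l, p.1 = k → p.2 = w) :
    ∀ d : PySem.Dict κ ν, (l.foldl (fun d p => d.insert p.1 p.2) d).getD k c = w := by
  induction l with
  | nil => exact absurd hex (by simp)
  | cons p l ih =>
    intro d
    rw [List.foldl_cons]
    by_cases hl : ∃ p' ∈ l, p'.1 = k
    · exact ih hl (fun p' hp' => hu p' (List.mem_cons_of_mem _ hp')) _
    · have hpk : p.1 = k := by
        rcases hex with ⟨p', hp', hk⟩
        rcases List.mem_cons.1 hp' with h | h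
        · exact h ▸ hk
        · exact absurd ⟨p', h, hk⟩ hl
      have habs : ∀ p' ∈ l, p'.1 ≠ k := fun p' hp' hk => hl ⟨p', hp', hk⟩
      rw [pv_getD_foldl_insert_absent l k c habs, PySem.Dict.getD_insert,
        if_pos hpk.symm]
      exact hu p List.mem_cons_self hpk

theorem pv_keys_foldl_insert_of_contains {κ ν : Type} [BEq κ] [LawfulBEq κ]
    (l : List (κ × ν)) :
    ∀ d : PySem.Dict κ ν, (∀ p ∈ l, d.contains p.1 = true) →
      (l.foldl (fun d p => d.insert p.1 p.2) d).keys = d.keys := by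
  induction l with
  | nil => intro d _; rfl
  | cons p l ih =>
    intro d h
    rw [List.foldl_cons, ih _ (fun p' hp' => by
        rw [PySem.Dict.contains_insert]
        simp [h p' (List.mem_cons_of_mem _ hp')])]
    exact PySem.Dict.keys_insert_of_contains d p.2 (h p List.mem_cons_self)

theorem pvCat_acc (L : PySem.Dict Int String) (l : List (Int × Int × Int)) :
    ∀ s : String, l.foldl (fun a p => a ++ L.getD p.1 "") s = s ++ pvCat L l := by
  induction l with
  | nil => intro s; simp [pvCat, String.append_empty]
  | cons x l ih =>
    intro s
    show l.foldl _ (s ++ L.getD x.1 "") = s ++ pvCat L (x :: l)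
    have hc : pvCat L (x :: l) = L.getD x.1 "" ++ pvCat L l := by
      show l.foldl _ ("" ++ L.getD x.1 "") = _
      rw [ih ("" ++ L.getD x.1 ""), String.empty_append]
    rw [ih (s ++ L.getD x.1 ""), hc, String.append_assoc]

theorem pvCat_cons (L : PySem.Dict Int String) (p : Int × Int × Int) (l : List (Int × Int × Int)) :
    pvCat L (p :: l) = L.getD p.1 "" ++ pvCat L l := by
  show l.foldl _ ("" ++ L.getD p.1 "") = _
  rw [pvCat_acc L l ("" ++ L.getD p.1 ""), String.empty_append]

theorem pv_pld_getD (L : PySem.Dict Int String) (q : Int × Int) (l : List (Int × Int × Int)) :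
    ∀ d : PySem.Dict (Int × Int) String,
      (l.foldl (fun d p =>
          if d.contains p.2 then d.insert p.2 (d.getD p.2 "" ++ L.getD p.1 "")
          else d.insert p.2 (L.getD p.1 "")) d).getD q ""
        = d.getD q "" ++ pvCat L (l.filter (fun p => p.2 == q)) := by
  induction l with
  | nil => intro d; simp [pvCat, String.append_empty]
  | cons p l ih =>
    intro d
    have hstep : ∀ d : PySem.Dict (Int × Int) String,
        ((if d.contains p.2 then d.insert p.2 (d.getD p.2 "" ++ L.getD p.1 "")
          else d.insert p.2 (L.getD p.1 "")) : PySem.Dict (Int × Int) String).getD q ""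
        = if q = p.2 then d.getD q "" ++ L.getD p.1 "" else d.getD q "" := by
      intro d
      by_cases hc : d.contains p.2
      · rw [if_pos hc, PySem.Dict.getD_insert]
        split_ifs with h
        · rw [h]
        · rfl
      · rw [if_neg (by simpa using hc), PySem.Dict.getD_insert]
        split_ifs with h
        · rw [h, PySem.Dict.getD_of_not_contains d "" (by simpa using hc), String.empty_append]
        · rfl
    rw [List.foldl_cons, ih, hstep]
    by_cases hq : p.2 = q
    · rw [if_pos hq.symm, List.filter_cons_of_pos (by simpa using hq), pvCat_cons,
        String.append_assoc]
    · rw [if_neg (fun h => hq h.symm), List.filter_cons_of_neg (by simpa using hq)]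

theorem pv_groups_getD (q : Int × Int) (l : List (Int × Int × Int)) :
    ∀ g : PySem.Dict (Int × Int) (List Int),
      (l.foldl (fun g p => g.modify p.2 [] (fun t => t ++ [p.1])) g).getD q []
        = g.getD q [] ++ (l.filter (fun p => p.2 == q)).map Prod.fst := by
  induction l with
  | nil => intro g; simp
  | cons p l ih =>
    intro g
    rw [List.foldl_cons, ih, PySem.Dict.getD_modify]
    by_cases hq : p.2 = q
    · subst hq
      rw [List.filter_cons_of_pos (by simp), if_pos rfl, List.map_cons]
      simp
    · rw [List.filter_cons_of_neg (by simpa using hq), if_neg (fun h => hq h.symm)]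

-- the common value: merged label of a key's position group (used to align the two final dicts)
theorem relabel_main (labels : List (Int × String)) (positions : List (Int × Int × Int))
    (hpre : Pre_relabel_labels_with_duplicated_pos labels positions) :
    relabel_labels_with_duplicated_pos labels positions
      = relabel_labels_with_duplicated_pos_alt labels positions := by
  unfold relabel_labels_with_duplicated_pos relabel_labels_with_duplicated_pos_alt
  show
    ((PySem.Dict.ofList positions).items.foldl
      (fun l2 p => l2.insert p.1
        (((PySem.Dict.ofList positions).items.foldl
          (fun d p =>
            if d.contains p.2 then d.insert p.2 (d.getD p.2 "" ++ (PySem.Dict.ofList labels).getD p.1 "")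
            else d.insert p.2 ((PySem.Dict.ofList labels).getD p.1 ""))
          PySem.Dict.empty).getD p.2 ""))
      (PySem.Dict.ofList labels)).items
    =
    (((PySem.Dict.ofList positions).items.foldl
        (fun g p => g.modify p.2 [] (fun t => t ++ [p.1])) PySem.Dict.empty).items.foldl
      (fun l2 g =>
        g.2.foldl (fun l2' id => l2'.insert id
          (g.2.foldl (fun acc id => acc ++ (PySem.Dict.ofList labels).getD id "") "")) l2)
      (PySem.Dict.ofList labels)).items
  set L := PySem.Dict.ofList labels with hLdef
  set M := (PySem.Dict.ofList positions).items with hMdef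
  set pld := M.foldl
      (fun d p =>
        if d.contains p.2 then d.insert p.2 (d.getD p.2 "" ++ L.getD p.1 "")
        else d.insert p.2 (L.getD p.1 ""))
      PySem.Dict.empty with hplddef
  set groups := M.foldl (fun g p => g.modify p.2 [] (fun t => t ++ [p.1])) PySem.Dict.empty
    with hgroupsdef
  -- basic facts about keys
  have hLnd : L.keys.Nodup := PySem.Dict.nodup_keys_ofList labels
  have hMfst : M.map Prod.fst = (PySem.Dict.ofList positions).keys := rfl
  have hMnd : (M.map Prod.fst).Nodup := by
    rw [hMfst]; exact PySem.Dict.nodup_keys_ofList positions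
  have hsub : ∀ p ∈ M, L.contains p.1 = true := by
    intro p hp
    have h1 : p.1 ∈ (PySem.Dict.ofList positions).keys := by
      rw [← hMfst]; exact List.mem_map_of_mem hp
    rw [pv_keys_ofList, PySem.Set.mem_ofList] at h1
    obtain ⟨r, hr, hr1⟩ := List.mem_map.1 h1
    obtain ⟨q, hq, hq1⟩ := hpre r hr
    have h2 : p.1 ∈ L.keys := by
      rw [hLdef, pv_keys_ofList, PySem.Set.mem_ofList]
      exact List.mem_map.2 ⟨q, hq, by rw [hq1, hr1]⟩
    exact (PySem.Dict.contains_iff_mem_keys L p.1).2 h2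
  -- groups facts
  have hGkeys : groups.keys = PySem.Set.ofList (M.map (fun p => p.2)) := by
    rw [hgroupsdef, PySem.Dict.keys_foldl_modify_key M (fun p => p.2) []
      (fun _ p => fun t => t ++ [p.1]) PySem.Dict.empty, PySem.Dict.keys_empty,
      PySem.Set.update_nil_left]
  have hGnd : groups.keys.Nodup := by rw [hGkeys]; exact PySem.Set.nodup_ofList _
  have hGval : ∀ g ∈ groups.items, g.2 = (M.filter (fun p => p.2 == g.1)).map Prod.fst := by
    intro g hg
    have h1 : groups.getD g.1 [] = g.2 :=
      PySem.Dict.getD_of_mem_items groups (by simpa using hg) hGnd []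
    rw [hgroupsdef, pv_groups_getD g.1 M PySem.Dict.empty] at h1
    simpa using h1.symm
  -- rewrite the two assignment loops as single insert-folds over pair lists
  have hAfold : M.foldl (fun l2 p => l2.insert p.1 (pld.getD p.2 "")) L
      = (M.map (fun p => (p.1, pld.getD p.2 ""))).foldl (fun d r => d.insert r.1 r.2) L := by
    rw [List.foldl_map]
  have hBfold : groups.items.foldl
      (fun l2 g => g.2.foldl (fun l2' id => l2'.insert id
        (g.2.foldl (fun acc id => acc ++ L.getD id "") "")) l2) L
      = (groups.items.flatMap (fun g => g.2.map
          (fun id => (id, g.2.foldl (fun acc id => acc ++ L.getD id "") "")))).foldl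
          (fun d r => d.insert r.1 r.2) L := by
    rw [List.foldl_flatMap]
    simp only [List.foldl_map]
  set AL := M.map (fun p => (p.1, pld.getD p.2 "")) with hALdef
  set BL := groups.items.flatMap (fun g => g.2.map
      (fun id => (id, g.2.foldl (fun acc id => acc ++ L.getD id "") ""))) with hBLdef
  rw [hAfold, hBfold]
  -- keys of both results are L.keys
  have hAkeys : (AL.foldl (fun d r => d.insert r.1 r.2) L).keys = L.keys := by
    apply pv_keys_foldl_insert_of_contains
    intro r hr
    obtain ⟨p, hp, rfl⟩ := List.mem_map.1 hr
    exact hsub p hp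
  have hBsubM : ∀ r ∈ BL, ∃ p ∈ M, p.1 = r.1 := by
    intro r hr
    obtain ⟨g, hg, hr2⟩ := List.mem_flatMap.1 hr
    obtain ⟨id, hid, rfl⟩ := List.mem_map.1 hr2
    rw [hGval g hg] at hid
    obtain ⟨p, hp, hp1⟩ := List.mem_map.1 hid
    exact ⟨p, List.mem_of_mem_filter hp, hp1⟩
  have hBkeys : (BL.foldl (fun d r => d.insert r.1 r.2) L).keys = L.keys := by
    apply pv_keys_foldl_insert_of_contains
    intro r hr
    obtain ⟨p, hp, hp1⟩ := hBsubM r hr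
    exact hp1 ▸ hsub p hp
  -- per-key agreement
  have hkey : ∀ k, (AL.foldl (fun d r => d.insert r.1 r.2) L).getD k ""
      = (BL.foldl (fun d r => d.insert r.1 r.2) L).getD k "" := by
    intro k
    by_cases hk : ∃ p ∈ M, p.1 = k
    · obtain ⟨p0, hp0, hp0k⟩ := hk
      have huniq : ∀ p ∈ M, p.1 = k → p = p0 := fun p hp hpk =>
        List.inj_on_of_nodup_map hMnd hp hp0 (by rw [hpk, hp0k])
      have hpld : pld.getD p0.2 "" = pvCat L (M.filter (fun p => p.2 == p0.2)) := by
        rw [hplddef, pv_pld_getD L p0.2 M PySem.Dict.empty, PySem.Dict.getD_empty,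
          String.empty_append]
      have hgval' : ∀ g ∈ groups.items, g.1 = p0.2 →
          g.2.foldl (fun acc id => acc ++ L.getD id "") ""
            = pvCat L (M.filter (fun p => p.2 == p0.2)) := by
        intro g hg hg1
        rw [hGval g hg, List.foldl_map, hg1]
        rfl
      rw [pv_getD_foldl_insert_uniform AL k "" (pvCat L (M.filter (fun p => p.2 == p0.2)))
          ⟨(p0.1, pld.getD p0.2 ""), List.mem_map_of_mem hp0, hp0k⟩
          (by
            intro r hr hrk
            obtain ⟨p, hp, rfl⟩ := List.mem_map.1 hr
            rw [huniq p hp hrk]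
            exact hpld) L,
        pv_getD_foldl_insert_uniform BL k "" (pvCat L (M.filter (fun p => p.2 == p0.2)))
          (by
            -- the pair (k, merged of p0's group) occurs in BL
            have hq : p0.2 ∈ groups.keys := by
              rw [hGkeys, PySem.Set.mem_ofList]
              exact List.mem_map_of_mem hp0
            obtain ⟨g, hg, hg1⟩ := List.mem_map.1 hq
            have hkin : k ∈ g.2 := by
              rw [hGval g hg]
              refine List.mem_map.2 ⟨p0, List.mem_filter.2 ⟨hp0, by simp [hg1]⟩, hp0k⟩
            exact ⟨(k, g.2.foldl (fun acc id => acc ++ L.getD id "") ""),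
              List.mem_flatMap.2 ⟨g, hg, List.mem_map.2 ⟨k, hkin, rfl⟩⟩, rfl⟩
          )
          (by
            intro r hr hrk
            obtain ⟨g, hg, hr2⟩ := List.mem_flatMap.1 hr
            obtain ⟨id, hid, rfl⟩ := List.mem_map.1 hr2
            have hid' := hid
            rw [hGval g hg] at hid'
            obtain ⟨p, hp, hp1⟩ := List.mem_map.1 hid'
            have hpM := List.mem_of_mem_filter hp
            have hpg : p.2 = g.1 := by
              have := List.of_mem_filter hp
              simpa using this
            have hpp0 : p = p0 := huniq p hpM (by rw [hp1]; exact hrk)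
            exact hgval' g hg (by rw [← hpg, hpp0])) L]
    · have habs : ∀ p ∈ M, p.1 ≠ k := by
        intro p hp hpk
        exact hk ⟨p, hp, hpk⟩
      rw [pv_getD_foldl_insert_absent AL k ""
          (by
            intro r hr
            obtain ⟨p, hp, rfl⟩ := List.mem_map.1 hr
            exact habs p hp) L,
        pv_getD_foldl_insert_absent BL k ""
          (by
            intro r hr
            obtain ⟨p, hp, hp1⟩ := hBsubM r hr
            exact hp1 ▸ habs p hp) L]
  -- both items lists are L.keys decorated with the (equal) final values
  rw [PySem.Dict.items_eq_map_keys _ (hAkeys ▸ hLnd) "",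
    PySem.Dict.items_eq_map_keys _ (hBkeys ▸ hLnd) "", hAkeys, hBkeys]
  exact List.map_congr_left (fun k _ => by rw [hkey k])

-- ===== VERDICT (by name: the statement is the Claim_ definition above) =====
theorem relabel_labels_with_duplicated_pos_spec : Claim_equal_relabel_labels_with_duplicated_pos := by
  intro labels positions _ hpre
  exact relabel_main labels positions hpre
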